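-- pv_equiv track=rewrite | github.com/Elijah884/Shuttle_files | python_can_test.py | hex_conversion
-- ===== SOURCE A (Python) =====
-- def hex_conversion(hex_str):
-- 	hex_list = list(hex_str)
-- 	buffer_list = []
-- 	output_list = []
-- 	for i in range (len(hex_list)):
-- 		buffer_list.append(hex_list[i].upper())
-- 		if i%2 != 0:
-- 			output_list.append(str(buffer_list[0])+str(buffer_list[1]))
-- 			buffer_list.clear()
-- 	output_str = " ".join(output_list)
-- 	return output_str
-- ===== SOURCE B (Python) =====
-- def hex_conversion(hex_str):
-- 	h = hex_str.upper()
-- 	return " ".join(h[i:i+2] for i in range(0, len(h) - 1, 2))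
-- ===== Notes on version B (the rewrite author's own statement) =====
-- stated objective: simpler
-- what changed: Replaces the per-character loop with its parity branch and two-element buffer list by a single upper() over the whole string and a join over slices taken at even pair-start positions.
import Mathlib
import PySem

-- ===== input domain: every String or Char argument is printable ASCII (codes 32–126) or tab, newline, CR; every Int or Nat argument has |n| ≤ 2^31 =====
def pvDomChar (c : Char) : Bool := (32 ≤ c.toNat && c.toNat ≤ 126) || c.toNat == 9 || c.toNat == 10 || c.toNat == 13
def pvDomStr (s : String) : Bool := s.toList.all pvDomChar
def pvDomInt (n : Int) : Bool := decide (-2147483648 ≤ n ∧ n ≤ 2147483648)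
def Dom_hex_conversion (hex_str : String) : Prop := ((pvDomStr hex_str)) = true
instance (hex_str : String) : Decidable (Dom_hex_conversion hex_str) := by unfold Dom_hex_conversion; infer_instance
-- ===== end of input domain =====

-- B replaces A's per-character loop (parity branch + two-slot buffer list) by one upper() pass
-- and a join over two-character slices at even positions; objective: simpler. A=B on all inputs.

-- ===== PORT A =====
-- loop body of A: append the uppercased character to the buffer; on an odd index,
-- emit buffer[0]+buffer[1] to the output list and clear the buffer
def pvStepA (st : List (List Char) × List (List Char)) (ic : Int × Char) :
    List (List Char) × List (List Char) :=
  let buffer_list := st.1 ++ [PySem.Chars.upper [ic.2]]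
  if PySem.Int.mod ic.1 2 ≠ 0 then
    ([], st.2 ++ [PySem.List.pyGetD buffer_list 0 [] ++ PySem.List.pyGetD buffer_list 1 []])
  else (buffer_list, st.2)

def hex_conversion (hex_str : String) : String :=
  let hex_list := hex_str.toList
  let st := (PySem.List.enumerate hex_list).foldl pvStepA ([], [])
  String.ofList (PySem.Chars.join [' '] st.2)

-- ===== PORT B =====
def hex_conversion_alt (hex_str : String) : String :=
  let h := PySem.Str.upper hex_str
  PySem.Str.join " "
    ((PySem.List.pyRange 0 (PySem.Str.len h - 1) 2).map
      (fun i => PySem.Str.slice h (some i) (some (i + 2))))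

-- ===== PRECONDITION & SPEC =====
def Spec_hex_conversion (hex_str : String) (out : String) : Prop := out = hex_conversion_alt hex_str
instance (hex_str : String) (out : String) : Decidable (Spec_hex_conversion hex_str out) := by unfold Spec_hex_conversion; infer_instance

-- ===== CLAIM (what is proved, stated in full; the proofs are below) =====
def Claim_equal_hex_conversion : Prop := ∀ (hex_str : String), Dom_hex_conversion hex_str → Spec_hex_conversion hex_str (hex_conversion hex_str)

-- ===== LEMMAS AND PROOFS =====

-- successive pairs of a char list (a trailing unpaired char is dropped)
def pvChunk2 : List Char → List (List Char)
  | a :: b :: t => [a, b] :: pvChunk2 t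
  | _ => []

-- A's loop, started at an even index with an empty buffer, appends exactly the uppercased pairs
theorem pvA_loop : ∀ (t : List Char) (m : Nat) (out : List (List Char)),
    ((PySem.List.enumerate t (2 * (m : Int))).foldl pvStepA ([], out)).2
      = out ++ pvChunk2 (PySem.Chars.upper t)
  | [], m, out => by simp [PySem.List.enumerate, pvChunk2, PySem.Chars.upper]
  | [a], m, out => by
      simp [PySem.List.enumerate, pvStepA, pvChunk2, PySem.Chars.upper]
  | a :: b :: t, m, out => by
      have h1 : ¬ PySem.Int.mod (2 * (m : Int)) 2 ≠ 0 := by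
        rw [PySem.Int.mod_eq_emod_of_pos (by norm_num)]; omega
      have h2 : PySem.Int.mod (2 * (m : Int) + 1) 2 ≠ 0 := by
        rw [PySem.Int.mod_eq_emod_of_pos (by norm_num)]; omega
      simp only [PySem.List.enumerate, List.foldl_cons, pvStepA, h1, h2, ite_not, if_false,
        List.nil_append]
      have he : 2 * (m : Int) + 1 + 1 = 2 * ((m + 1 : Nat) : Int) := by push_cast; ring
      rw [he, pvA_loop t (m + 1)]
      simp [pvChunk2, PySem.Chars.upper, PySem.List.pyGetD, PySem.List.pyGet?, PySem.List.pyIdx?]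

-- range(0, n-1, 2) enumerates the n/2 pair-start positions
theorem pvRange_pairs (n : Nat) :
    PySem.List.pyRange 0 ((n : Int) - 1) 2
      = (List.range (n / 2)).map (fun k => ((2 * k : Nat) : Int)) := by
  rw [PySem.List.pyRange_of_pos 0 _ (by norm_num)]
  have hc : (if (0 : Int) < (n : Int) - 1 then ((((n : Int) - 1) - 0 + 2 - 1) / 2).toNat else 0)
      = n / 2 := by
    split_ifs with h <;> omega
  rw [hc]
  refine List.map_congr_left (fun k _ => ?_)
  push_cast; ring

-- taking two-character slices at the pair-start positions yields exactly the pairs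
theorem pvB_core : ∀ (us : List Char),
    (List.range (us.length / 2)).map (fun k => (us.drop (2 * k)).take 2) = pvChunk2 us
  | [] => by simp [pvChunk2]
  | [a] => by simp [pvChunk2]
  | a :: b :: t => by
      have hl : (a :: b :: t).length / 2 = t.length / 2 + 1 := by simp; omega
      rw [hl, List.range_succ_eq_map, List.map_cons, List.map_map]
      simp only [pvChunk2]
      refine congrArg₂ _ (by simp) ?_
      rw [← pvB_core t]
      refine List.map_congr_left (fun k _ => ?_)
      simp only [Function.comp_apply]
      have h2 : 2 * Nat.succ k = 2 * k + 1 + 1 := by omega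
      rw [h2, List.drop_succ_cons, List.drop_succ_cons]

theorem pvB_map (us : List Char) :
    (PySem.List.pyRange 0 ((us.length : Int) - 1) 2).map
        (fun i => PySem.List.slice us (some i) (some (i + 2)))
      = pvChunk2 us := by
  rw [pvRange_pairs, List.map_map, ← pvB_core us]
  refine List.map_congr_left (fun k _ => ?_)
  simp only [Function.comp_apply]
  have : ((2 * k : Nat) : Int) + 2 = ((2 * k + 2 : Nat) : Int) := by push_cast; ring
  rw [this, PySem.List.slice_natCast]
  have : 2 * k + 2 - 2 * k = 2 := by omega
  rw [this]

-- ===== VERDICT (by name: the statement is the Claim_ definition above) =====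
theorem hex_conversion_spec : Claim_equal_hex_conversion := by
  intro s _
  unfold Spec_hex_conversion hex_conversion hex_conversion_alt
  apply String.ofList_eq.mpr
  rw [PySem.Str.toList_join, List.map_map]
  have hlen : PySem.Str.len (PySem.Str.upper s) = (((PySem.Str.upper s).toList.length : Nat) : Int) := by
    rw [PySem.Str.len_eq]
  have hsl : (fun i => (PySem.Str.slice (PySem.Str.upper s) (some i) (some (i + 2))).toList)
      = (fun i => PySem.List.slice (PySem.Str.upper s).toList (some i) (some (i + 2))) := by
    funext i
    rw [PySem.Str.toList_slice, PySem.Chars.slice_eq_listSlice]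
  have hz : PySem.List.enumerate s.toList = PySem.List.enumerate s.toList (2 * ((0 : Nat) : Int)) := by norm_num
  rw [hlen]
  have hjoin : (" " : String).toList = [' '] := by decide
  calc PySem.Chars.join [' '] (((PySem.List.enumerate s.toList).foldl pvStepA ([], [])).2)
      = PySem.Chars.join [' '] (pvChunk2 (PySem.Chars.upper s.toList)) := by
        rw [hz, pvA_loop s.toList 0 []]; simp
    _ = PySem.Chars.join (" " : String).toList
          ((PySem.List.pyRange 0 (((PySem.Str.upper s).toList.length : Int) - 1) 2).map
            ((fun i => PySem.List.slice (PySem.Str.upper s).toList (some i) (some (i + 2))))) := by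
        rw [hjoin, pvB_map]
        rw [PySem.Str.toList_upper]
    _ = _ := by
        refine congrArg _ (List.map_congr_left (fun i _ => ?_))
        simp only [Function.comp_apply, PySem.Str.toList_slice, PySem.Chars.slice_eq_listSlice]
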